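-- pv_equiv track=rewrite | github.com/gitMatiH/Programacion1 | EjercicioMundial1.py | cantEncuestados
-- ===== SOURCE A (Python) =====
-- def cantEncuestados(sucursales):
--     i = 0
--     suc_boe = 0
--     suc_cab = 0
--     while i<len(sucursales):
--         if sucursales[i] == 'B':
--             suc_boe = suc_boe+1
--         elif sucursales[i] == 'C':
--             suc_cab = suc_cab+1
--         i = i + 1
--     return suc_boe, suc_cab
-- ===== SOURCE B (Python) =====
-- def cantEncuestados(sucursales):
--     n = len(sucursales)
--     if n == 0:
--         return 0, 0
--     if n == 1:
--         h = sucursales[0]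
--         return (1 if h == 'B' else 0), (1 if h == 'C' else 0)
--     m = n // 2
--     b1, c1 = cantEncuestados(sucursales[:m])
--     b2, c2 = cantEncuestados(sucursales[m:])
--     return b1 + b2, c1 + c2
-- ===== Notes on version B (the rewrite author's own statement) =====
-- stated objective: alternative
-- what changed: Replaces A's index-driven while loop with two scalar accumulators by a divide-and-conquer recursion that splits the list in half, counts each half recursively and adds the resulting pairs (correct because counts are additive over concatenation).
import Mathlib
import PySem

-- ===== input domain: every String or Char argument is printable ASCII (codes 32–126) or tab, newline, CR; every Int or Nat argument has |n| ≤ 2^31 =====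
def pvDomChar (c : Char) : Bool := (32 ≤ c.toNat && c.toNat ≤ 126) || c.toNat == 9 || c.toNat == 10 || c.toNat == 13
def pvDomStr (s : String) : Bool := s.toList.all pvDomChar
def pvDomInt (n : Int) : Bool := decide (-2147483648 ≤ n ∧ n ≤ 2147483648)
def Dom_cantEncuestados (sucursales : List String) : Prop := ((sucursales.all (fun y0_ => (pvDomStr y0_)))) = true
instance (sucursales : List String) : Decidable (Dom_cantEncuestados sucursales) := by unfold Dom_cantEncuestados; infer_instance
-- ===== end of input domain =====

-- B replaces A's index-driven while loop (two scalar accumulators) by a divide-and-conquer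
-- recursion: split the list in half, count each half, add the pairs (alternative; same value
-- because counts are additive over concatenation).

-- ===== PORT A =====
-- the while loop of A: index i, accumulators suc_boe / suc_cab
def cantLoop (xs : List String) (i : Nat) (b c : Int) : Int × Int :=
  if h : i < xs.length then
    if xs[i] = "B" then cantLoop xs (i + 1) (b + 1) c
    else if xs[i] = "C" then cantLoop xs (i + 1) b (c + 1)
    else cantLoop xs (i + 1) b c
  else (b, c)
termination_by xs.length - i

def cantEncuestados (sucursales : List String) : Int × Int :=
  cantLoop sucursales 0 0 0

-- ===== PORT B =====
def cantEncuestados_alt (sucursales : List String) : Int × Int :=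
  if _h0 : sucursales.length = 0 then (0, 0)
  else if h1 : sucursales.length = 1 then
    let h := sucursales[0]'(by omega)
    ((if h = "B" then 1 else 0), (if h = "C" then 1 else 0))
  else
    let m := sucursales.length / 2
    let p := cantEncuestados_alt (sucursales.take m)
    let q := cantEncuestados_alt (sucursales.drop m)
    (p.1 + q.1, p.2 + q.2)
termination_by sucursales.length
decreasing_by
  · simp; omega
  · simp; omega

-- ===== PRECONDITION & SPEC =====
def Spec_cantEncuestados (sucursales : List String) (out : Int × Int) : Prop := out = cantEncuestados_alt sucursales
instance (sucursales : List String) (out : Int × Int) : Decidable (Spec_cantEncuestados sucursales out) := by unfold Spec_cantEncuestados; infer_instance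

-- ===== CLAIM =====
def Claim_equal_cantEncuestados : Prop := ∀ (sucursales : List String), Dom_cantEncuestados sucursales → Spec_cantEncuestados sucursales (cantEncuestados sucursales)

-- ===== LEMMAS AND PROOFS =====
theorem cantLoop_eq_count (xs : List String) (i : Nat) (b c : Int) :
    cantLoop xs i b c = (b + ((xs.drop i).count "B" : Int), c + ((xs.drop i).count "C" : Int)) := by
  by_cases h : i < xs.length
  · have hdrop : xs.drop i = xs[i] :: xs.drop (i + 1) := List.drop_eq_getElem_cons h
    rw [cantLoop]
    simp only [h, dif_pos]
    by_cases hB : xs[i] = "B"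
    · rw [if_pos hB, cantLoop_eq_count, hdrop]
      simp only [List.count_cons, hB, beq_self_eq_true, if_true, Prod.mk.injEq]
      constructor <;> push_cast <;> ring
    · rw [if_neg hB]
      by_cases hC : xs[i] = "C"
      · rw [if_pos hC, cantLoop_eq_count, hdrop]
        simp only [List.count_cons, Prod.mk.injEq]
        rw [if_neg (by simp [hC]), if_pos (by simp [hC])]
        constructor <;> push_cast <;> ring
      · rw [if_neg hC, cantLoop_eq_count, hdrop]
        simp only [List.count_cons, Prod.mk.injEq]
        rw [if_neg (by simp [hB]), if_neg (by simp [hC])]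
        exact ⟨rfl, rfl⟩
  · have : xs.drop i = [] := List.drop_eq_nil_of_le (by omega)
    rw [cantLoop]
    simp [h, this]
termination_by xs.length - i

theorem alt_eq_count (xs : List String) :
    cantEncuestados_alt xs = ((xs.count "B" : Int), (xs.count "C" : Int)) := by
  rw [cantEncuestados_alt]
  by_cases h0 : xs.length = 0
  · have : xs = [] := List.length_eq_zero_iff.mp h0
    simp [this]
  · rw [dif_neg h0]
    by_cases h1 : xs.length = 1
    · rw [dif_pos h1]
      obtain ⟨a, ha⟩ := List.length_eq_one_iff.mp h1
      subst ha
      simp only [List.getElem_cons_zero, List.count_cons, List.count_nil, Prod.mk.injEq]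
      constructor
      · by_cases hB : a = "B" <;> simp [hB]
      · by_cases hC : a = "C" <;> simp [hC]
    · rw [dif_neg h1]
      simp only [alt_eq_count (xs.take (xs.length / 2)), alt_eq_count (xs.drop (xs.length / 2))]
      have hsplit : xs.take (xs.length / 2) ++ xs.drop (xs.length / 2) = xs :=
        List.take_append_drop _ xs
      have hB : (xs.take (xs.length / 2)).count "B" + (xs.drop (xs.length / 2)).count "B"
          = xs.count "B" := by rw [← List.count_append, hsplit]
      have hC : (xs.take (xs.length / 2)).count "C" + (xs.drop (xs.length / 2)).count "C"
          = xs.count "C" := by rw [← List.count_append, hsplit]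
      simp only [Prod.mk.injEq]
      constructor <;> push_cast [← hB, ← hC] <;> ring
termination_by xs.length
decreasing_by
  · simp; omega
  · simp; omega

-- ===== VERDICT =====
theorem cantEncuestados_spec : Claim_equal_cantEncuestados := by
  intro xs _
  unfold Spec_cantEncuestados cantEncuestados
  rw [cantLoop_eq_count, alt_eq_count]
  simp
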